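-- pv_equiv track=rewrite | github.com/daniel-reich/ubiquitous-fiesta | vC4P2jGR6wxED7MBL_23.py | larger_than_right
-- ===== SOURCE A (Python) =====
-- def larger_than_right(lst):
--   result = []
--   for x in range(len(lst)):
--     for y in range(x + 1, len(lst)):
--       if lst[x] <= lst[y]:
--         break
--       if y == len(lst) - 1:
--         result.append(lst[x])
--   result.append(lst[-1])
--   return result
-- ===== SOURCE B (Python) =====
-- def larger_than_right(lst):
--     result = []
--     mx = None
--     for v in reversed(lst):
--         if mx is None or v > mx:
--             result.append(v)
--             mx = v
--     result.reverse()
--     return result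
-- ===== Notes on version B (the rewrite author's own statement) =====
-- stated objective: faster
-- what changed: Replaces the quadratic nested index scan with a single right-to-left pass tracking the running maximum, collecting elements greater than it and reversing at the end.
import Mathlib
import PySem

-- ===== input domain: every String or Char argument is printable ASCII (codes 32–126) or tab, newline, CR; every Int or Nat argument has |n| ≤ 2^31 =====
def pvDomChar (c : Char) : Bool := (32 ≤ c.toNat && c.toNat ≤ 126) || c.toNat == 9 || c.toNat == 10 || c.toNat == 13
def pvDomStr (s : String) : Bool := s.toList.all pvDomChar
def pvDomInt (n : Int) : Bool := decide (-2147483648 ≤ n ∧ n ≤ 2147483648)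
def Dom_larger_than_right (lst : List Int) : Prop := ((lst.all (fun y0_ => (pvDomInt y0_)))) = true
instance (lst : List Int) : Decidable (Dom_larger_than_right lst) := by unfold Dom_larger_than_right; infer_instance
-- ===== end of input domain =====

-- B replaces A's quadratic nested index scan by one right-to-left pass tracking the running maximum (objective: faster).

-- ===== PORT A =====
-- inner 'for y in range(x+1, len(lst))': break on lst[x] <= lst[y], append lst[x] at the last index
def pvInnerA (lst : List Int) (x : Int) (ys : List Int) (res : List Int) : List Int :=
  match ys with
  | [] => res
  | y :: rest =>
    if PySem.List.pyGetD lst x 0 ≤ PySem.List.pyGetD lst y 0 then res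
    else pvInnerA lst x rest
      (if y = PySem.List.len lst - 1 then res ++ [PySem.List.pyGetD lst x 0] else res)

-- outer 'for x in range(len(lst))'
def pvOuterA (lst : List Int) (xs : List Int) (res : List Int) : List Int :=
  match xs with
  | [] => res
  | x :: rest =>
    pvOuterA lst rest (pvInnerA lst x (PySem.List.pyRange (x + 1) (PySem.List.len lst) 1) res)

def larger_than_right (lst : List Int) : List Int :=
  pvOuterA lst (PySem.List.pyRange 0 (PySem.List.len lst) 1) [] ++ [PySem.List.pyGetD lst (-1) 0]

-- ===== PORT B =====
-- loop body: 'if mx is None or v > mx: result.append(v); mx = v'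
def pvStepB (st : Option Int × List Int) (v : Int) : Option Int × List Int :=
  match st.1 with
  | none => (some v, st.2 ++ [v])
  | some m => if m < v then (some v, st.2 ++ [v]) else st

def larger_than_right_alt (lst : List Int) : List Int :=
  (lst.reverse.foldl pvStepB (none, [])).2.reverse

-- ===== PRECONDITION & SPEC =====
-- Pre_ excludes only the empty list, on which A raises IndexError indexing the last element.
def Pre_larger_than_right (lst : List Int) : Prop := lst ≠ []
instance (lst : List Int) : Decidable (Pre_larger_than_right lst) := by
  unfold Pre_larger_than_right; infer_instance
def pvWitness_larger_than_right : List Int := [3, 1, 2]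

def Spec_larger_than_right (lst : List Int) (out : List Int) : Prop := out = larger_than_right_alt lst
instance (lst : List Int) (out : List Int) : Decidable (Spec_larger_than_right lst out) := by
  unfold Spec_larger_than_right; infer_instance

-- ===== CLAIM (what is proved, stated in full; the proofs are below) =====
def Claim_equal_larger_than_right : Prop := ∀ (lst : List Int), Dom_larger_than_right lst → Pre_larger_than_right lst → Spec_larger_than_right lst (larger_than_right lst)

-- ===== LEMMAS AND PROOFS =====

-- Common specification: the elements strictly greater than everything to their right.
def pvLeaders : List Int → List Int
  | [] => []
  | v :: t => if (∀ w ∈ t, w < v) then v :: pvLeaders t else pvLeaders t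

-- ---- B side ----

def pvStSpec : List Int → Option Int × List Int
  | [] => (none, [])
  | v :: t => pvStepB (pvStSpec t) v

theorem pvFoldl_rev_eq (lst : List Int) :
    lst.reverse.foldl pvStepB (none, []) = pvStSpec lst := by
  induction lst with
  | nil => rfl
  | cons v t ih => simp [List.reverse_cons, List.foldl_append, ih, pvStSpec]

theorem pvStSpec_spec (lst : List Int) :
    ((pvStSpec lst).1 = none → lst = []) ∧
    (∀ m, (pvStSpec lst).1 = some m → ∀ w ∈ lst, w ≤ m) ∧
    ((pvStSpec lst).1 ≠ none → ∃ m ∈ lst, (pvStSpec lst).1 = some m) ∧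
    (pvStSpec lst).2 = (pvLeaders lst).reverse := by
  induction lst with
  | nil => simp [pvStSpec, pvLeaders]
  | cons v t ih =>
    obtain ⟨h0, hub, hmem, hacc⟩ := ih
    rcases hst : pvStSpec t with ⟨mo, acc⟩
    rw [hst] at h0 hub hmem hacc
    simp only at h0 hub hmem hacc
    have hstep : pvStSpec (v :: t) = pvStepB (mo, acc) v := by
      simp [pvStSpec, hst]
    cases mo with
    | none =>
      have ht : t = [] := h0 rfl
      subst ht
      simp only [pvLeaders] at hacc
      simp only [List.reverse_nil] at hacc
      have hv : pvStSpec [v] = (some v, acc ++ [v]) := by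
        rw [hstep]; simp [pvStepB]
      rw [hv]
      simp [pvLeaders, hacc]
    | some m =>
      have hmemt : m ∈ t := by
        obtain ⟨m2, hm2, heq⟩ := hmem (by simp)
        obtain rfl : m = m2 := by simpa using heq
        exact hm2
      have hle : ∀ w ∈ t, w ≤ m := hub m rfl
      by_cases hlt : m < v
      · have hall : ∀ w ∈ t, w < v := fun w hw => lt_of_le_of_lt (hle w hw) hlt
        have hv : pvStSpec (v :: t) = (some v, acc ++ [v]) := by
          rw [hstep]; simp [pvStepB, hlt]
        rw [hv]
        simp only [pvLeaders, if_pos hall]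
        refine ⟨by simp, ?_, by simp, by simp [hacc]⟩
        intro m2 hm2 w hw
        simp only [Option.some.injEq] at hm2
        subst hm2
        rcases List.mem_cons.mp hw with rfl | hw
        · exact le_refl w
        · exact le_of_lt (hall w hw)
      · have hnall : ¬ (∀ w ∈ t, w < v) := fun hAll => hlt (hAll m hmemt)
        have hv : pvStSpec (v :: t) = (some m, acc) := by
          rw [hstep]; simp [pvStepB, hlt]
        rw [hv]
        simp only [pvLeaders, if_neg hnall]
        refine ⟨by simp, ?_, ?_, hacc⟩
        · intro m2 hm2 w hw
          simp only [Option.some.injEq] at hm2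
          subst hm2
          rcases List.mem_cons.mp hw with rfl | hw
          · exact le_of_not_gt hlt
          · exact hle w hw
        · intro _
          exact ⟨m, List.mem_cons_of_mem _ hmemt, by simp⟩

theorem pvAlt_eq_leaders (lst : List Int) : larger_than_right_alt lst = pvLeaders lst := by
  unfold larger_than_right_alt
  rw [pvFoldl_rev_eq, (pvStSpec_spec lst).2.2.2, List.reverse_reverse]

-- ---- A side ----

theorem pvInner_nil (lst : List Int) (x : Int) (a : Nat) (res : List Int)
    (ha : lst.length ≤ a) :
    pvInnerA lst x (PySem.List.pyRange (a : Int) (PySem.List.len lst) 1) res = res := by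
  have hempty : PySem.List.pyRange (a : Int) (PySem.List.len lst) 1 = [] := by
    rw [PySem.List.pyRange_one]
    simp [PySem.List.len_eq, List.range_eq_nil]
    omega
  rw [hempty]
  rfl

theorem pvInner_spec (lst : List Int) (x : Nat) (hx : x < lst.length) :
    ∀ (fuel a : Nat) (res : List Int), lst.length - a ≤ fuel → x < a →
    pvInnerA lst (x : Int) (PySem.List.pyRange (a : Int) (PySem.List.len lst) 1) res =
      if a < lst.length ∧ ∀ w ∈ lst.drop a, w < lst[x] then res ++ [lst[x]] else res := by
  intro fuel
  induction fuel with
  | zero =>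
    intro a res hfuel hxa
    rw [pvInner_nil lst _ a res (by omega), if_neg]
    rintro ⟨h1, -⟩
    omega
  | succ fuel ih =>
    intro a res hfuel hxa
    by_cases ha : a < lst.length
    · have hcons := PySem.List.pyRange_one_cons
        (a := (a : Int)) (b := PySem.List.len lst)
        (by rw [PySem.List.len_eq]; exact_mod_cast ha)
      rw [hcons]
      simp only [pvInnerA]
      have hgx : PySem.List.pyGetD lst (x : Int) 0 = lst[x] := by
        rw [PySem.List.pyGetD_natCast]; exact List.getD_eq_getElem lst 0 hx
      have hga : PySem.List.pyGetD lst (a : Int) 0 = lst[a] := by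
        rw [PySem.List.pyGetD_natCast]; exact List.getD_eq_getElem lst 0 ha
      have hdrop : lst.drop a = lst[a] :: lst.drop (a + 1) := List.drop_eq_getElem_cons ha
      rw [hgx, hga]
      by_cases hle : lst[x] ≤ lst[a]
      · rw [if_pos hle, if_neg]
        rintro ⟨-, hall⟩
        exact absurd (hall lst[a] (by rw [hdrop]; exact List.mem_cons_self)) (not_lt.mpr hle)
      · rw [if_neg hle]
        rw [not_le] at hle
        have hcast : (a : Int) + 1 = ((a + 1 : Nat) : Int) := by push_cast; ring
        rw [hcast, ih (a + 1) _ (by omega) (by omega)]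
        by_cases hlast : a + 1 = lst.length
        · have hif : (a : Int) = PySem.List.len lst - 1 := by
            rw [PySem.List.len_eq]; omega
          rw [if_pos hif, if_neg (by rintro ⟨h1, -⟩; omega), if_pos]
          refine ⟨ha, ?_⟩
          intro w hw
          rw [hdrop, List.drop_eq_nil_of_le (by omega), List.mem_singleton] at hw
          subst hw
          exact hle
        · have hif : ¬ ((a : Int) = PySem.List.len lst - 1) := by
            rw [PySem.List.len_eq]; omega
          rw [if_neg hif]
          have hiff : (a + 1 < lst.length ∧ ∀ w ∈ lst.drop (a + 1), w < lst[x]) ↔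
              (a < lst.length ∧ ∀ w ∈ lst.drop a, w < lst[x]) := by
            constructor
            · rintro ⟨h1, h2⟩
              refine ⟨by omega, ?_⟩
              intro w hw
              rw [hdrop] at hw
              rcases List.mem_cons.mp hw with rfl | hw
              · exact hle
              · exact h2 w hw
            · rintro ⟨h1, h2⟩
              refine ⟨by omega, ?_⟩
              intro w hw
              exact h2 w (by rw [hdrop]; exact List.mem_cons_of_mem _ hw)
          rw [if_congr hiff rfl rfl]
    · rw [pvInner_nil lst _ a res (by omega), if_neg]
      rintro ⟨h1, -⟩
      omega

theorem pvOuter_spec (lst : List Int) :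
    ∀ (fuel x : Nat) (res : List Int), lst.length - x ≤ fuel → ∀ (hx : x < lst.length),
    pvOuterA lst (PySem.List.pyRange (x : Int) (PySem.List.len lst) 1) res
      ++ [lst[lst.length - 1]'(by omega)] = res ++ pvLeaders (lst.drop x) := by
  intro fuel
  induction fuel with
  | zero =>
    intro x res hfuel hx
    exact absurd hx (by omega)
  | succ fuel ih =>
    intro x res hfuel hx
    rw [PySem.List.pyRange_one_cons
      (a := (x : Int)) (b := PySem.List.len lst)
      (by rw [PySem.List.len_eq]; exact_mod_cast hx)]
    simp only [pvOuterA]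
    have hcast : (x : Int) + 1 = ((x + 1 : Nat) : Int) := by push_cast; ring
    rw [hcast, pvInner_spec lst x hx lst.length (x + 1) res (by omega) (by omega)]
    have hdrop : lst.drop x = lst[x] :: lst.drop (x + 1) := List.drop_eq_getElem_cons hx
    by_cases hlast : x + 1 = lst.length
    · have hempty : PySem.List.pyRange ((x + 1 : Nat) : Int) (PySem.List.len lst) 1 = [] := by
        rw [PySem.List.pyRange_one]
        simp [PySem.List.len_eq, List.range_eq_nil]
        omega
      rw [if_neg (by rintro ⟨h1, -⟩; omega), hempty]
      simp only [pvOuterA]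
      have hdrop2 : lst.drop (x + 1) = [] := List.drop_eq_nil_of_le (by omega)
      rw [hdrop, hdrop2]
      have hidx : lst.length - 1 = x := by omega
      simp [pvLeaders, hidx]
    · have h2 : x + 1 < lst.length := by omega
      rw [ih (x + 1) _ (by omega) h2, hdrop]
      simp only [pvLeaders]
      by_cases hall : ∀ w ∈ lst.drop (x + 1), w < lst[x]
      · rw [if_pos ⟨h2, hall⟩, if_pos hall]
        simp
      · rw [if_neg (fun h => hall h.2), if_neg hall]

theorem pvA_eq_leaders (lst : List Int) (h : lst ≠ []) :
    larger_than_right lst = pvLeaders lst := by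
  unfold larger_than_right
  have hn : 0 < lst.length := List.length_pos_iff.mpr h
  have hg : PySem.List.pyGetD lst (-1) 0 = lst.getLast h := PySem.List.pyGetD_neg_one (h := h) (d := 0)
  rw [hg, List.getLast_eq_getElem h]
  have hmain := pvOuter_spec lst lst.length 0 [] (by omega) hn
  rw [show ((0 : Nat) : Int) = 0 by simp] at hmain
  simpa using hmain

-- ===== VERDICT (by name: the statement is the Claim_ definition above) =====
theorem larger_than_right_spec : Claim_equal_larger_than_right := by
  intro lst _ hpre
  unfold Spec_larger_than_right
  rw [pvA_eq_leaders lst hpre, pvAlt_eq_leaders]
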